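-- pv_equiv track=rewrite | github.com/m2ndla/iti0102-2022 | EX/ex08_solution_and_tests/solution.py | fruit_order
-- ===== SOURCE A (Python) =====
-- def fruit_order(small_baskets: int, big_baskets: int, ordered_amount: int) -> int:
--     """
--     Return number of small fruit baskets if it's possible to finish the order, otherwise return -1.
--
--     (4, 1, 9) -> 4
--     (3, 1, 10) -> -1
--     """
--     most_big_baskets = [0]
--     if big_baskets != 0:
--         for number in range(1, big_baskets + 1):
--             if number * 5 <= ordered_amount:
--                 most_big_baskets.append(number)
--             else:
--                 break
--     needed = int(ordered_amount - int(most_big_baskets[-1] * 5))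
--     if big_baskets >= (ordered_amount / 5):
--         if small_baskets >= (ordered_amount % 5):
--             return needed
--         else:
--             if big_baskets > (ordered_amount / 5):
--                 return needed
--     else:
--         if small_baskets >= int(ordered_amount - big_baskets * 5):
--             return needed
--         else:
--             return -1
-- ===== SOURCE B (Python) =====
-- def fruit_order(small_baskets: int, big_baskets: int, ordered_amount: int) -> int:
--     """Closed-form: use as many big baskets as useful, then check small ones. O(1)."""
--     used = max(0, min(big_baskets, ordered_amount // 5))
--     needed = ordered_amount - 5 * used
--     if 5 * big_baskets >= ordered_amount or small_baskets >= ordered_amount - 5 * big_baskets: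
--         return needed
--     return -1
-- ===== Notes on version B (the rewrite author's own statement) =====
-- stated objective: faster
-- what changed: Replaced the O(big_baskets) loop that enumerates usable big baskets with the closed form max(0, min(big_baskets, ordered_amount // 5)) and a flat arithmetic branch, and merged A's nested branch structure into a single disjunction.
-- outside the precondition, e.g. on fruit_order(-1, 1, 5): A returns None, B returns 0
import Mathlib
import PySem

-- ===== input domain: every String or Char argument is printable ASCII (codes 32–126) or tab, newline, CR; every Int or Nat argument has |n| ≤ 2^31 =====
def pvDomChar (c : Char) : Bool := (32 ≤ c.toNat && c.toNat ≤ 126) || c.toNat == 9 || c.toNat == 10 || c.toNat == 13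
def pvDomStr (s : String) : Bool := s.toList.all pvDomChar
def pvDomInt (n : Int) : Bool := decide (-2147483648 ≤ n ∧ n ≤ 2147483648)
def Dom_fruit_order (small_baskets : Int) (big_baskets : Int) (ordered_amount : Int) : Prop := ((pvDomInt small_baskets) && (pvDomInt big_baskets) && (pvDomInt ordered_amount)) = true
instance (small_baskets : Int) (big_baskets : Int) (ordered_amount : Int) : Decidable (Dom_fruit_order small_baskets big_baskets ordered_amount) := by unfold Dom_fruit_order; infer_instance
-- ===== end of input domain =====

-- ===== PORT A =====
-- B replaces A's O(big_baskets) enumeration loop with O(1) closed-form arithmetic (objective: faster).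
-- for number in range(1, big_baskets + 1): append number while number * 5 <= ordered_amount, else break
def fruitLoop (b o : Int) (number : Int) (acc : List Int) : List Int :=
  if number ≤ b then
    if number * 5 ≤ o then fruitLoop b o (number + 1) (acc ++ [number])
    else acc
  else acc
termination_by (b + 1 - number).toNat
decreasing_by omega

def fruit_order (small_baskets : Int) (big_baskets : Int) (ordered_amount : Int) : Option Int :=
  let most_big_baskets :=
    if big_baskets ≠ 0 then fruitLoop big_baskets ordered_amount 1 [0]
    else [0]
  match PySem.List.pyGet? most_big_baskets (-1) with
  | none => none   -- unreachable: most_big_baskets always starts with [0]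
  | some last =>
    let needed := ordered_amount - last * 5
    -- Python compares ints with the float ordered_amount / 5; for |ordered_amount| ≤ 2^31 the float
    -- rounding error is < 2^-20 while a non-equal int differs from ordered_amount/5 by ≥ 1/5, so the
    -- comparison is exactly 5 * big_baskets ≥ ordered_amount (resp. >); ported as that exact int test.
    if 5 * big_baskets ≥ ordered_amount then
      if small_baskets ≥ PySem.Int.mod ordered_amount 5 then some needed
      else if 5 * big_baskets > ordered_amount then some needed
      else none   -- Python falls off the function and returns None here
    else
      if small_baskets ≥ ordered_amount - big_baskets * 5 then some needed
      else some (-1)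

-- ===== PORT B =====
def fruit_order_alt (small_baskets : Int) (big_baskets : Int) (ordered_amount : Int) : Option Int :=
  let used := max 0 (min big_baskets (PySem.Int.floordiv ordered_amount 5))
  let needed := ordered_amount - 5 * used
  if 5 * big_baskets ≥ ordered_amount ∨ small_baskets ≥ ordered_amount - 5 * big_baskets then
    some needed
  else some (-1)

-- ===== PRECONDITION & SPEC =====
-- Pre_ excludes exactly the inputs with 5*big_baskets = ordered_amount and small_baskets < 0, where the
-- Python A falls through every branch and returns None instead of an int; B returns the leftover amount there.
def Pre_fruit_order (small_baskets : Int) (big_baskets : Int) (ordered_amount : Int) : Prop :=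
  ¬ (5 * big_baskets = ordered_amount ∧ small_baskets < 0)
instance (small_baskets : Int) (big_baskets : Int) (ordered_amount : Int) : Decidable (Pre_fruit_order small_baskets big_baskets ordered_amount) := by unfold Pre_fruit_order; infer_instance

def pvWitness_fruit_order : Int × Int × Int := (4, 1, 9)

def Spec_fruit_order (small_baskets : Int) (big_baskets : Int) (ordered_amount : Int) (out : Option Int) : Prop := out = fruit_order_alt small_baskets big_baskets ordered_amount
instance (small_baskets : Int) (big_baskets : Int) (ordered_amount : Int) (out : Option Int) : Decidable (Spec_fruit_order small_baskets big_baskets ordered_amount out) := by unfold Spec_fruit_order; infer_instance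

-- ===== CLAIM (what is proved, stated in full; the proofs are below) =====
def Claim_equal_fruit_order : Prop := ∀ (small_baskets : Int) (big_baskets : Int) (ordered_amount : Int), Dom_fruit_order small_baskets big_baskets ordered_amount → Pre_fruit_order small_baskets big_baskets ordered_amount → Spec_fruit_order small_baskets big_baskets ordered_amount (fruit_order small_baskets big_baskets ordered_amount)

-- ===== LEMMAS AND PROOFS =====

-- the last element the loop has appended, as a function of the counter and the previous last
def lastCounter (b o : Int) (number : Int) (x : Int) : Int :=
  if number ≤ b then
    if number * 5 ≤ o then lastCounter b o (number + 1) number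
    else x
  else x
termination_by (b + 1 - number).toNat
decreasing_by omega

theorem fruitLoop_getLast? (b o : Int) (k : Nat) : ∀ (n : Int) (acc : List Int) (x : Int),
    (b + 1 - n).toNat = k →
    (fruitLoop b o n (acc ++ [x])).getLast? = some (lastCounter b o n x) := by
  induction k with
  | zero =>
    intro n acc x hk
    rw [fruitLoop, lastCounter, if_neg (by omega), if_neg (by omega)]
    simp
  | succ k ih =>
    intro n acc x hk
    rw [fruitLoop, lastCounter, if_pos (show n ≤ b by omega), if_pos (show n ≤ b by omega)]
    by_cases hc : n * 5 ≤ o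
    · rw [if_pos hc, if_pos hc]
      exact ih (n + 1) (acc ++ [x]) n (by omega)
    · rw [if_neg hc, if_neg hc]
      simp

theorem lastCounter_eq (b o : Int) (k : Nat) : ∀ n : Int, b + 1 - n = (k : Int) →
    lastCounter b o n (n - 1) = max (n - 1) (min b (PySem.Int.floordiv o 5)) := by
  induction k with
  | zero =>
    intro n hk
    rw [lastCounter, if_neg (by omega)]
    have hq := PySem.Int.le_floordiv_iff_mul_le (a := o) (b := 5) (q := n) (by omega)
    omega
  | succ k ih =>
    intro n hk
    have hq := PySem.Int.le_floordiv_iff_mul_le (a := o) (b := 5) (q := n) (by omega)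
    rw [lastCounter, if_pos (by omega)]
    split
    · rename_i hle
      have := ih (n + 1) (by omega)
      rw [show (n + 1 - 1 : Int) = n by ring] at this
      rw [this]
      omega
    · rename_i hgt
      omega

theorem pyGet?_neg_one_eq_getLast? (l : List Int) (h : l ≠ []) :
    PySem.List.pyGet? l (-1) = l.getLast? := by
  unfold PySem.List.pyGet? PySem.List.pyIdx?
  have hl : 0 < l.length := List.length_pos_iff.mpr h
  have h1 : ¬ ((0:Int) ≤ -1) := by norm_num
  have h2 : -(l.length:Int) ≤ -1 := by omega
  rw [if_neg h1, if_pos h2]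
  simp [List.getLast?_eq_getElem?]

theorem most_last (b o : Int) :
    PySem.List.pyGet?
      (if b ≠ 0 then fruitLoop b o 1 [0] else [0]) (-1)
      = some (max 0 (min b (PySem.Int.floordiv o 5))) := by
  have hq0 := PySem.Int.le_floordiv_iff_mul_le (a := o) (b := 5) (q := 0) (by omega)
  by_cases h0 : b = 0
  · subst h0
    have : PySem.List.pyGet? ([0] : List Int) (-1) = some 0 := by decide
    simp only [ne_eq, not_true_eq_false, if_false, this, Option.some.injEq]
    omega
  · rw [if_pos h0]
    by_cases hneg : b < 0
    · rw [fruitLoop, if_neg (by omega)]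
      have h01 : PySem.List.pyGet? ([0] : List Int) (-1) = some 0 := by decide
      rw [h01]
      congr 1
      omega
    · -- b ≥ 1
      set k : Nat := b.toNat with hk
      have hbk : (k : Int) = b := by omega
      have hlast := fruitLoop_getLast? b o k 1 [] 0 (by omega)
      have hne : fruitLoop b o 1 [0] ≠ [] := by
        intro hcontra
        have : fruitLoop b o 1 ([] ++ [0]) = fruitLoop b o 1 [0] := rfl
        rw [this, hcontra] at hlast
        simp at hlast
      rw [pyGet?_neg_one_eq_getLast? _ hne]
      have : fruitLoop b o 1 ([] ++ [0]) = fruitLoop b o 1 [0] := rfl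
      rw [this] at hlast
      rw [hlast]
      rw [show (lastCounter b o 1 0) = lastCounter b o 1 (1 - 1) by norm_num,
        lastCounter_eq b o k 1 (by omega)]
      norm_num

theorem fruit_order_spec : Claim_equal_fruit_order := by
  intro s b o _hdom hpre
  unfold Spec_fruit_order fruit_order fruit_order_alt
  simp only [most_last b o]
  have hq5 := PySem.Int.le_floordiv_iff_mul_le (a := o) (b := 5) (q := b) (by omega)
  set q := PySem.Int.floordiv o 5 with hq
  by_cases hbig : 5 * b ≥ o
  · rw [if_pos hbig, if_pos (Or.inl hbig)]
    by_cases hsmall : s ≥ PySem.Int.mod o 5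
    · rw [if_pos hsmall]
      congr 1
      ring
    · rw [if_neg hsmall]
      by_cases hstrict : 5 * b > o
      · rw [if_pos hstrict]
        congr 1
        ring
      · exfalso
        have heq : 5 * b = o := by omega
        have hmod : PySem.Int.mod o 5 = 0 := by
          rw [PySem.Int.mod_eq_zero_iff_dvd]
          exact ⟨b, by omega⟩
        exact hpre ⟨heq, by omega⟩
  · rw [if_neg hbig]
    by_cases hs : s ≥ o - b * 5
    · rw [if_pos hs, if_pos (Or.inr (by omega))]
      congr 1
      ring
    · rw [if_neg hs, if_neg]
      intro hor
      rcases hor with h | h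
      · exact hbig h
      · exact hs (by omega)
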